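-- pv_equiv track=rewrite | github.com/myersm0/tei-littre | src/tei_littre/spotcheck.py | align_sections
-- ===== SOURCE A (Python) =====
-- def align_sections(source_secs, tei_secs):
-- 	seen = set()
-- 	ordered_labels = []
-- 	for label, _ in source_secs + tei_secs:
-- 		if label not in seen:
-- 			seen.add(label)
-- 			ordered_labels.append(label)
--
-- 	source_map = {}
-- 	for label, text in source_secs:
-- 		source_map.setdefault(label, []).append(text)
-- 	tei_map = {}
-- 	for label, text in tei_secs:
-- 		tei_map.setdefault(label, []).append(text)
--
-- 	aligned = []
-- 	for label in ordered_labels: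
-- 		s = "\n".join(source_map.get(label, []))
-- 		t = "\n".join(tei_map.get(label, []))
-- 		aligned.append((label, s, t))
-- 	return aligned
-- ===== SOURCE B (Python) =====
-- def align_sections(source_secs, tei_secs):
-- 	labels = []
-- 	for label, _ in source_secs + tei_secs:
-- 		if label not in labels:
-- 			labels.append(label)
-- 	return [(label,
-- 	         "\n".join(t for l, t in source_secs if l == label),
-- 	         "\n".join(t for l, t in tei_secs if l == label))
-- 	        for label in labels]
-- ===== Notes on version B (the rewrite author's own statement) =====
-- stated objective: alternative
-- what changed: B builds no grouping maps at all: it dedups the labels into an ordered list, then for each label scans and filters both input lists directly and joins the matching texts (per-label nested scan, O(n*k), instead of A's hash-map grouping, O(n)).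
import Mathlib
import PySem

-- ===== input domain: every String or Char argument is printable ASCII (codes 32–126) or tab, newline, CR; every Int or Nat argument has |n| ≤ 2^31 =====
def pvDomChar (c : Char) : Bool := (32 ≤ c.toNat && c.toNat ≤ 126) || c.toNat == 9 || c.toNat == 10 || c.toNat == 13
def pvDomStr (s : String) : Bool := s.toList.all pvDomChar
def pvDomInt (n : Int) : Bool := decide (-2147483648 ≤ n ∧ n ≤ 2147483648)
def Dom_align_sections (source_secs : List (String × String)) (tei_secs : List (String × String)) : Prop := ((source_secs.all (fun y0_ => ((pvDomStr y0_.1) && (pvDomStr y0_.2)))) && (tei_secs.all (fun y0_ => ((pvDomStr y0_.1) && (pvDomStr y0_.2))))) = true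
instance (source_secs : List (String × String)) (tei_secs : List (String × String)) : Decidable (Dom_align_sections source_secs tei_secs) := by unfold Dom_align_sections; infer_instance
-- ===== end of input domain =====

-- B builds no grouping maps: it dedups the labels into an ordered list and then, per label,
-- filters both input lists directly and joins the matches (alternative decomposition, same value).

-- ===== PORT A =====
def align_sections (source_secs : List (String × String)) (tei_secs : List (String × String)) : List (String × String × String) :=
  let st := (source_secs ++ tei_secs).foldl
    (fun (st : PySem.Set String × List String) lt =>
      if st.1.contains lt.1 then st else (PySem.Set.add st.1 lt.1, st.2 ++ [lt.1]))
    (PySem.Set.empty, [])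
  let ordered_labels := st.2
  let source_map := source_secs.foldl
    (fun d lt => d.modify lt.1 [] (fun xs => xs ++ [lt.2]))
    (PySem.Dict.empty : PySem.Dict String (List String))
  let tei_map := tei_secs.foldl
    (fun d lt => d.modify lt.1 [] (fun xs => xs ++ [lt.2]))
    (PySem.Dict.empty : PySem.Dict String (List String))
  ordered_labels.map (fun label =>
    (label, PySem.Str.join "\n" (source_map.getD label []),
            PySem.Str.join "\n" (tei_map.getD label [])))

-- ===== PORT B =====
def align_sections_alt (source_secs : List (String × String)) (tei_secs : List (String × String)) : List (String × String × String) :=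
  let labels := (source_secs ++ tei_secs).foldl
    (fun (acc : List String) lt => if lt.1 ∈ acc then acc else acc ++ [lt.1]) []
  labels.map (fun label =>
    (label,
     PySem.Str.join "\n" ((source_secs.filter (fun p => p.1 == label)).map Prod.snd),
     PySem.Str.join "\n" ((tei_secs.filter (fun p => p.1 == label)).map Prod.snd)))

-- ===== PRECONDITION & SPEC =====
def Spec_align_sections (source_secs : List (String × String)) (tei_secs : List (String × String)) (out : List (String × String × String)) : Prop := out = align_sections_alt source_secs tei_secs
instance (source_secs : List (String × String)) (tei_secs : List (String × String)) (out : List (String × String × String)) : Decidable (Spec_align_sections source_secs tei_secs out) := by unfold Spec_align_sections; infer_instance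

-- ===== CLAIM =====
def Claim_equal_align_sections : Prop := ∀ (source_secs : List (String × String)) (tei_secs : List (String × String)), Dom_align_sections source_secs tei_secs → Spec_align_sections source_secs tei_secs (align_sections source_secs tei_secs)

-- ===== LEMMAS AND PROOFS =====

-- A's seen/ordered pair loop keeps both components equal; each is a Set.add fold over the labels.
theorem seen_ordered_fold (l : List (String × String)) (s : List String) :
    l.foldl (fun (st : PySem.Set String × List String) lt =>
        if st.1.contains lt.1 then st else (PySem.Set.add st.1 lt.1, st.2 ++ [lt.1])) (s, s)
    = ((l.map Prod.fst).foldl PySem.Set.add s, (l.map Prod.fst).foldl PySem.Set.add s) := by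
  induction l generalizing s with
  | nil => rfl
  | cons hd tl ih =>
    by_cases h : hd.1 ∈ s
    · simpa [PySem.Set.add, h] using ih s
    · simpa [PySem.Set.add, h] using ih (s ++ [hd.1])

-- B's membership-dedup fold is the same function as PySem.Set.add folded over the labels.
theorem labels_fold_eq (l : List (String × String)) (s : List String) :
    l.foldl (fun (acc : List String) lt => if lt.1 ∈ acc then acc else acc ++ [lt.1]) s
    = (l.map Prod.fst).foldl PySem.Set.add s := by
  induction l generalizing s with
  | nil => rfl
  | cons hd tl ih => by_cases h : hd.1 ∈ s <;> simp [PySem.Set.add, h, ih]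

-- ===== VERDICT =====
theorem align_sections_spec : Claim_equal_align_sections := by
  intro src tei _
  show align_sections src tei = align_sections_alt src tei
  simp only [align_sections, align_sections_alt]
  simp only [PySem.Set.empty]
  rw [seen_ordered_fold, labels_fold_eq]
  refine List.map_congr_left (fun k _ => ?_)
  simp [PySem.Dict.getD_foldl_modify_append]
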